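-- pv_equiv track=rewrite | github.com/vedYeole/gameCheats | AnagramsWinner.py | wordHasTooManyOfALetter
-- ===== SOURCE A (Python) =====
-- def wordHasTooManyOfALetter(charList:list, word:str) -> bool:
--     copyOfCharList = charList.copy()
--     for letter in word:
--         if letter in copyOfCharList:
--             copyOfCharList.remove(letter)
--         else: # ruh roh
--             return True #cant be having more of a letter than is in charlist
--     return False
-- ===== SOURCE B (Python) =====
-- def wordHasTooManyOfALetter(charList: list, word: str) -> bool:
--     need = {}
--     for c in word:
--         need[c] = need.get(c, 0) + 1
--     have = {}
--     for s in charList: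
--         have[s] = have.get(s, 0) + 1
--     return any(have.get(c, 0) < n for c, n in need.items())
-- ===== Notes on version B (the rewrite author's own statement) =====
-- stated objective: faster
-- what changed: B builds two frequency tables (dicts) in one pass each and compares counts per distinct letter, replacing A's per-character membership-test-and-remove loop on a mutable copy of the list.
import Mathlib
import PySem

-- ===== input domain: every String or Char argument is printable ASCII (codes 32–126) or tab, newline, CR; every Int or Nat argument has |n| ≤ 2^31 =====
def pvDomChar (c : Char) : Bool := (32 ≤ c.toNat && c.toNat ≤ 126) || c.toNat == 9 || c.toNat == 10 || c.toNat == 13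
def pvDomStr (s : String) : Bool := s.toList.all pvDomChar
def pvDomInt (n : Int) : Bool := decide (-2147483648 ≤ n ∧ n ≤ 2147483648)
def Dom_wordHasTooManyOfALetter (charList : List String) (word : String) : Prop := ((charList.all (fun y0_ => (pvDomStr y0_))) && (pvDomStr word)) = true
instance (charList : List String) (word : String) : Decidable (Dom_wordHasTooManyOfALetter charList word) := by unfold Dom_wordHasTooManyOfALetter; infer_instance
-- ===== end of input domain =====

-- B builds two frequency tables once and compares per distinct letter, instead of A's per-character test-and-remove loop on a mutable copy (A copies charList, so the caller sees no mutation).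

-- ===== PORT A =====
-- the for-loop over the word with the shrinking copy of charList, early return True on a missing letter
def pvLoopA : List Char → List String → Bool
  | [], _ => false
  | c :: rest, avail =>
      if String.ofList [c] ∈ avail then pvLoopA rest (avail.erase (String.ofList [c]))
      else true

def wordHasTooManyOfALetter (charList : List String) (word : String) : Bool :=
  pvLoopA word.toList charList

-- ===== PORT B =====
def wordHasTooManyOfALetter_alt (charList : List String) (word : String) : Bool :=
  let need := word.toList.foldl (fun d c => d.insert c (d.getD c 0 + 1)) (PySem.Dict.empty : PySem.Dict Char Int)
  let haveD := charList.foldl (fun d s => d.insert s (d.getD s 0 + 1)) (PySem.Dict.empty : PySem.Dict String Int)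
  need.items.any (fun p => decide (haveD.getD (String.ofList [p.1]) 0 < p.2))

-- ===== PRECONDITION & SPEC =====
def Spec_wordHasTooManyOfALetter (charList : List String) (word : String) (out : Bool) : Prop := out = wordHasTooManyOfALetter_alt charList word
instance (charList : List String) (word : String) (out : Bool) : Decidable (Spec_wordHasTooManyOfALetter charList word out) := by unfold Spec_wordHasTooManyOfALetter; infer_instance

-- ===== CLAIM (what is proved, stated in full; the proofs are below) =====
def Claim_equal_wordHasTooManyOfALetter : Prop := ∀ (charList : List String) (word : String), Dom_wordHasTooManyOfALetter charList word → Spec_wordHasTooManyOfALetter charList word (wordHasTooManyOfALetter charList word)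

-- ===== LEMMAS AND PROOFS =====

theorem pvMkSingle_inj {c c' : Char} (h : String.ofList [c] = String.ofList [c']) : c = c' := by
  have h2 := congrArg String.toList h
  simp at h2
  exact h2

-- A's consume loop returns true iff some letter of the word occurs more often in the word than in the available list
theorem pvLoopA_iff (w : List Char) (avail : List String) :
    pvLoopA w avail = true ↔ ∃ c ∈ w, avail.count (String.ofList [c]) < w.count c := by
  induction w generalizing avail with
  | nil => simp [pvLoopA]
  | cons c rest ih =>
    simp only [pvLoopA]
    by_cases h : String.ofList [c] ∈ avail
    · rw [if_pos h, ih]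
      have hpos : 1 ≤ avail.count (String.ofList [c]) := List.count_pos_iff.mpr h
      constructor
      · rintro ⟨c', hc', hlt⟩
        by_cases hcc : c' = c
        · subst hcc
          refine ⟨c', List.mem_cons_self, ?_⟩
          rw [List.count_erase_self] at hlt
          simp only [List.count_cons_self]
          omega
        · refine ⟨c', List.mem_cons_of_mem _ hc', ?_⟩
          rw [List.count_erase_of_ne (fun he => hcc (pvMkSingle_inj he))] at hlt
          have hne : (c == c') = false := by simp [Ne.symm hcc]
          simp only [List.count_cons, hne]
          exact hlt
      · rintro ⟨c', hc', hlt⟩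
        by_cases hcc : c' = c
        · subst hcc
          simp only [List.count_cons_self] at hlt
          have hmem : c' ∈ rest := by
            by_contra hnm
            have : rest.count c' = 0 := List.count_eq_zero.mpr hnm
            omega
          refine ⟨c', hmem, ?_⟩
          rw [List.count_erase_self]
          omega
        · have hmem : c' ∈ rest := by
            rcases List.mem_cons.mp hc' with h1 | h1
            · exact absurd h1 hcc
            · exact h1
          refine ⟨c', hmem, ?_⟩
          rw [List.count_erase_of_ne (fun he => hcc (pvMkSingle_inj he))]
          have hne : (c == c') = false := by simp [Ne.symm hcc]
          simp only [List.count_cons, hne] at hlt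
          exact hlt
    · rw [if_neg h]
      simp only [true_iff]
      refine ⟨c, List.mem_cons_self, ?_⟩
      have : avail.count (String.ofList [c]) = 0 := List.count_eq_zero.mpr h
      simp [this, List.count_cons_self]

-- B's comparison pass, rewritten through the Counter lemmas
theorem pvAlt_iff (charList : List String) (word : String) :
    wordHasTooManyOfALetter_alt charList word = true ↔
      ∃ c ∈ word.toList, charList.count (String.ofList [c]) < word.toList.count c := by
  unfold wordHasTooManyOfALetter_alt
  simp only [PySem.Dict.foldl_insert_getD_add_one_eq_counter, PySem.Dict.items_counter,
    List.any_map, List.any_eq_true, Function.comp, decide_eq_true_eq,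
    PySem.Dict.getD_counter, PySem.Set.mem_ofList]
  constructor
  · rintro ⟨c, hc, hlt⟩
    exact ⟨c, hc, by exact_mod_cast hlt⟩
  · rintro ⟨c, hc, hlt⟩
    exact ⟨c, hc, by exact_mod_cast hlt⟩

-- ===== VERDICT (by name: the statement is the Claim_ definition above) =====
theorem wordHasTooManyOfALetter_spec : Claim_equal_wordHasTooManyOfALetter := by
  intro charList word _
  unfold Spec_wordHasTooManyOfALetter wordHasTooManyOfALetter
  rcases h : wordHasTooManyOfALetter_alt charList word with _ | _
  · rw [Bool.eq_false_iff]
    intro hA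
    have := (pvLoopA_iff word.toList charList).mp hA
    exact (Bool.eq_false_iff.mp h) ((pvAlt_iff charList word).mpr this)
  · exact (pvLoopA_iff word.toList charList).mpr ((pvAlt_iff charList word).mp h)
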